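-- pv_equiv track=rewrite | github.com/srwmay08/MUD | mud_backend/core/stat_roller.py | _assign_stats_by_priority
-- ===== SOURCE A (Python) =====
-- from typing import List, Dict
--
-- def _assign_stats_by_priority(pool: List[int], priority_list: List[str], stats_to_fill: List[str]) -> Dict[str, int]:
--     """
--     Helper function to assign stats based on a priority list.
--     THIS IS THE MODIFIED FUNCTION.
--     It now only assigns stats that are in the 'stats_to_fill' list,
--     using the values from the provided 'pool' list.
--     """
--
--     # Sort the rolled pool, highest to lowest
--     sorted_pool = sorted(pool, reverse=True)
--
--     new_assignments = {}
--
--     # 1. Create a mutable copy of the stats to fill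
--     remaining_stats_to_fill = list(stats_to_fill)
--
--     # 2. Priority Pass: Assign stats that are in both the
--     #    priority list AND the list of stats we need to fill.
--     for stat_name in priority_list:
--         if stat_name in remaining_stats_to_fill:
--             if not sorted_pool: break # Stop if we run out of pool values
--             new_assignments[stat_name] = sorted_pool.pop(0)
--             remaining_stats_to_fill.remove(stat_name)
--
--     # 3. Remaining Pass: Assign the rest of the pool to the
--     #    rest of the stats (alphabetically).
--     remaining_stats_to_fill.sort()
--     for stat_name in remaining_stats_to_fill:
--         if not sorted_pool: break # Stop if we run out of pool values
--         new_assignments[stat_name] = sorted_pool.pop(0)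
--
--     return new_assignments
-- ===== SOURCE B (Python) =====
-- from typing import List, Dict
--
-- def _assign_stats_by_priority(pool: List[int], priority_list: List[str], stats_to_fill: List[str]) -> Dict[str, int]:
--     # Value-driven greedy: walk the pool values highest-first and pick each
--     # value's recipient on the spot -- the next priority entry still needed
--     # (cursor j), otherwise the alphabetically smallest remaining name
--     # (remaining is kept sorted, so that is remaining[0]).
--     remaining = sorted(stats_to_fill)
--     out = {}
--     j = 0
--     for value in sorted(pool, reverse=True):
--         if not remaining:
--             break
--         while j < len(priority_list) and priority_list[j] not in remaining:
--             j += 1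
--         if j < len(priority_list):
--             name = priority_list[j]
--             j += 1
--         else:
--             name = remaining[0]
--         remaining.remove(name)
--         out[name] = value
--     return out
-- ===== Notes on version B (the rewrite author's own statement) =====
-- stated objective: alternative
-- what changed: Replaces A's two staged name-driven passes (a priority pass mutating a remaining list, then a separate sorted-leftover pass) by one value-driven greedy loop over the descending pool that picks each value's recipient on the spot: advance a cursor through priority_list to the next still-needed entry, else take the head of an initially sorted remaining list.
import Mathlib
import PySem

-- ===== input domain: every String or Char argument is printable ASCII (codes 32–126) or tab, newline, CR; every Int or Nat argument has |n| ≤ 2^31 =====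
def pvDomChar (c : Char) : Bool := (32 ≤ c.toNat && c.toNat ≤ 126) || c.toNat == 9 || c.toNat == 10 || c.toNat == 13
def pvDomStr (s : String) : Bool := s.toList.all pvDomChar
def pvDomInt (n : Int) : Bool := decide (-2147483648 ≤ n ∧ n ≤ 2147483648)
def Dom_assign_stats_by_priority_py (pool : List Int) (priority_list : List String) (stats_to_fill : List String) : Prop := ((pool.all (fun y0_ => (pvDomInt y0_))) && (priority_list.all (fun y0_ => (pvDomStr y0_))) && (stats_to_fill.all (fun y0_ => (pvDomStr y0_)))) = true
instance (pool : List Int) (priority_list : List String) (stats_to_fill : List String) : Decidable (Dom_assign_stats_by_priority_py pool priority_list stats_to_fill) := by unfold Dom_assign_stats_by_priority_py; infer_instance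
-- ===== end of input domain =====

-- B replaces A's two staged name-driven passes by a single value-driven greedy loop over the
-- descending pool, selecting each value's recipient on the spot (objective: alternative).

-- ===== PORT A =====
-- pass 3: `for stat_name in remaining: if not sorted_pool: break; new_assignments[stat_name] = sorted_pool.pop(0)`
def pvA_remPass : List String → List Int → PySem.Dict String Int → PySem.Dict String Int
  | [], _, d => d
  | _ :: _, [], d => d          -- `if not sorted_pool: break`
  | s :: rest, v :: ps, d => pvA_remPass rest ps (d.insert s v)

-- pass 2; returns (new_assignments, sorted_pool, remaining_stats_to_fill) after the loop / break
def pvA_prioPass : List String → List Int → List String → PySem.Dict String Int → PySem.Dict String Int × List Int × List String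
  | [], pool, rem, d => (d, pool, rem)
  | s :: rest, pool, rem, d =>
    if s ∈ rem then
      match pool with
      | [] => (d, [], rem)      -- `if not sorted_pool: break`
      | v :: ps =>
        -- `remaining.remove(s)`: guarded by `s in remaining`, so remove? is `some`; .getD only totalizes
        pvA_prioPass rest ps ((PySem.List.remove? rem s).getD rem) (d.insert s v)
    else pvA_prioPass rest pool rem d

def assign_stats_by_priority_py (pool : List Int) (priority_list : List String) (stats_to_fill : List String) : List (String × Int) :=
  let sorted_pool := PySem.List.sorted pool (fun x => x) true
  match pvA_prioPass priority_list sorted_pool stats_to_fill PySem.Dict.empty with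
  | (d, pool', rem') => (pvA_remPass (PySem.List.sorted rem' (fun x => x) false) pool' d).items

-- ===== PORT B =====
-- the `for value in sorted(pool, reverse=True)` loop; state: priority cursor (as the
-- not-yet-visited suffix of priority_list), the sorted `remaining` list, and `out`
def pvB_loop : List Int → List String → List String → PySem.Dict String Int → PySem.Dict String Int
  | [], _, _, d => d
  | v :: vs, prio, rem, d =>
    match rem with
    | [] => d                                              -- `if not remaining: break`
    | r :: _ =>
      -- `while j < len(priority_list) and priority_list[j] not in remaining: j += 1`
      match prio.dropWhile (fun s => !rem.contains s) with
      | s :: rest =>                                       -- `name = priority_list[j]; j += 1`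
        pvB_loop vs rest ((PySem.List.remove? rem s).getD rem) (d.insert s v)
      | [] =>                                              -- `name = remaining[0]`
        pvB_loop vs [] ((PySem.List.remove? rem r).getD rem) (d.insert r v)

def assign_stats_by_priority_py_alt (pool : List Int) (priority_list : List String) (stats_to_fill : List String) : List (String × Int) :=
  (pvB_loop (PySem.List.sorted pool (fun x => x) true) priority_list
      (PySem.List.sorted stats_to_fill (fun x => x) false) PySem.Dict.empty).items

-- ===== PRECONDITION & SPEC =====
def Spec_assign_stats_by_priority_py (pool : List Int) (priority_list : List String) (stats_to_fill : List String) (out : List (String × Int)) : Prop := out = assign_stats_by_priority_py_alt pool priority_list stats_to_fill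
instance (pool : List Int) (priority_list : List String) (stats_to_fill : List String) (out : List (String × Int)) : Decidable (Spec_assign_stats_by_priority_py pool priority_list stats_to_fill out) := by unfold Spec_assign_stats_by_priority_py; infer_instance

-- ===== CLAIM (what is proved, stated in full; the proofs are below) =====
def Claim_equal_assign_stats_by_priority_py : Prop := ∀ (pool : List Int) (priority_list : List String) (stats_to_fill : List String), Dom_assign_stats_by_priority_py pool priority_list stats_to_fill → Spec_assign_stats_by_priority_py pool priority_list stats_to_fill (assign_stats_by_priority_py pool priority_list stats_to_fill)

-- ===== LEMMAS AND PROOFS =====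

-- the common assignment order: priority matches first, then the leftovers sorted
def pvOrder : List String → List String → List String
  | [], rem => PySem.List.sorted rem (fun x => x) false
  | s :: rest, rem => if s ∈ rem then s :: pvOrder rest (rem.erase s) else pvOrder rest rem

theorem pvA_remPass_nil_pool (ns : List String) (d : PySem.Dict String Int) :
    pvA_remPass ns [] d = d := by cases ns <;> rfl

theorem pvA_remPass_eq_foldl_zip (ns : List String) (pool : List Int) (d : PySem.Dict String Int) :
    pvA_remPass ns pool d = (ns.zip pool).foldl (fun d p => d.insert p.1 p.2) d := by
  induction ns generalizing pool d with
  | nil => rfl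
  | cons s rest ih => cases pool with
    | nil => rfl
    | cons v ps => simp [pvA_remPass, ih]

-- A's two passes together compute exactly the fold of insert over pvOrder zipped with the pool
theorem pvA_eq_zip (prio : List String) (pool : List Int) (rem : List String) (d : PySem.Dict String Int) :
    pvA_remPass (PySem.List.sorted (pvA_prioPass prio pool rem d).2.2 (fun x => x) false)
        (pvA_prioPass prio pool rem d).2.1 (pvA_prioPass prio pool rem d).1
    = ((pvOrder prio rem).zip pool).foldl (fun d p => d.insert p.1 p.2) d := by
  induction prio generalizing pool rem d with
  | nil => simp [pvA_prioPass, pvOrder, pvA_remPass_eq_foldl_zip]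
  | cons s rest ih =>
    by_cases hm : s ∈ rem
    · cases pool with
      | nil => simp [pvA_prioPass, pvOrder, hm, pvA_remPass_nil_pool]
      | cons v ps =>
        have hr : PySem.List.remove? rem s = some (rem.erase s) :=
          PySem.List.remove?_eq_some_erase rem s hm
        simp [pvA_prioPass, pvOrder, hm, hr, ih]
    · simp [pvA_prioPass, pvOrder, hm, ih]

-- pvOrder depends on `rem` only through its multiset
theorem pvOrder_perm (prio : List String) (rem rem' : List String) (h : rem.Perm rem') :
    pvOrder prio rem = pvOrder prio rem' := by
  induction prio generalizing rem rem' with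
  | nil =>
    simp only [pvOrder]
    exact (PySem.List.sorted_id_eq_sorted_id_iff_perm rem rem').mpr h
  | cons s rest ih =>
    by_cases hm : s ∈ rem
    · have hm' : s ∈ rem' := h.mem_iff.mp hm
      simp only [pvOrder, hm, hm', if_true]
      exact congrArg _ (ih _ _ (h.erase s))
    · have hm' : s ∉ rem' := fun hx => hm (h.mem_iff.mpr hx)
      simp only [pvOrder, hm, hm', if_false]
      exact ih _ _ h
-- pvOrder of an empty remaining list is empty
theorem pvOrder_nil (prio : List String) : pvOrder prio [] = [] := by
  induction prio with
  | nil => rfl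
  | cons s rest ih => simp [pvOrder, ih]

-- skipping priority entries not in `rem` does not change pvOrder
theorem pvOrder_dropWhile (prio rem : List String) :
    pvOrder prio rem = pvOrder (prio.dropWhile (fun s => !rem.contains s)) rem := by
  induction prio with
  | nil => rfl
  | cons s rest ih =>
    by_cases hm : s ∈ rem
    · simp [hm]
    · simp [pvOrder, hm, ih]

-- the first element surviving dropWhile fails the predicate
theorem pvDropWhile_head {p : String → Bool} {l : List String} {s : String} {rest : List String}
    (h : l.dropWhile p = s :: rest) : p s = false := by
  induction l with
  | nil => simp at h
  | cons a t ih =>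
    rw [List.dropWhile_cons] at h
    split at h
    · exact ih h
    · cases h; simp_all

-- a ≤-sorted list is its own Python sort
theorem pvSorted_fix (l : List String) (h : l.Pairwise (· ≤ ·)) :
    PySem.List.sorted l (fun x => x) false = l :=
  PySem.List.sorted_eq_self_of_pairwise l _ h

-- B's loop, on a sorted remaining list, is the fold of insert over pvOrder zipped with the pool
theorem pvB_loop_eq (vs : List Int) (prio rem : List String) (d : PySem.Dict String Int)
    (hrem : rem.Pairwise (· ≤ ·)) :
    pvB_loop vs prio rem d = ((pvOrder prio rem).zip vs).foldl (fun d p => d.insert p.1 p.2) d := by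
  induction vs generalizing prio rem d with
  | nil => simp [pvB_loop]
  | cons v vs ih =>
    cases rem with
    | nil => simp [pvB_loop, pvOrder_nil]
    | cons r rt =>
      rw [pvOrder_dropWhile]
      cases hdw : (prio.dropWhile (fun s => !(r :: rt).contains s)) with
      | cons s rest =>
        have hs : s ∈ r :: rt := by
          have h1 := pvDropWhile_head hdw
          simp at h1
          rw [List.mem_cons]
          by_cases hsr : s = r
          · exact Or.inl hsr
          · exact Or.inr (h1 hsr)
        have hr : PySem.List.remove? (r :: rt) s = some ((r :: rt).erase s) :=
          PySem.List.remove?_eq_some_erase _ s hs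
        simp only [pvB_loop, hdw, hr, Option.getD_some, pvOrder, hs, if_true,
          List.zip_cons_cons, List.foldl_cons]
        exact ih rest _ _ (hrem.sublist (List.erase_sublist))
      | nil =>
        have hfix : pvOrder [] (r :: rt) = r :: rt := pvSorted_fix _ hrem
        have hrt : pvOrder [] rt = rt := pvSorted_fix _ (List.Pairwise.sublist (by simp) hrem)
        simp only [pvB_loop, hdw, PySem.List.remove?_cons_self, Option.getD_some, hfix,
          List.zip_cons_cons, List.foldl_cons]
        rw [ih [] rt _ (List.Pairwise.sublist (by simp) hrem), hrt]

-- ===== VERDICT (by name: the statement is the Claim_ definition above) =====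
theorem assign_stats_by_priority_py_spec : Claim_equal_assign_stats_by_priority_py := by
  intro pool prio stats _
  unfold Spec_assign_stats_by_priority_py
  simp only [assign_stats_by_priority_py, assign_stats_by_priority_py_alt]
  rw [pvB_loop_eq _ _ _ _ (by simpa using PySem.List.sorted_pairwise stats (fun x => x)),
    pvOrder_perm prio _ stats (PySem.List.sorted_perm stats (fun x => x) false),
    pvA_eq_zip]
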